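-- pv_equiv track=rewrite | github.com/Hattiffnat/my_leetcode_and_codewars | python/codewars/longes_slide_down.py | get_new_indexes
-- ===== SOURCE A (Python) =====
-- def get_new_indexes(pile):
--
--     new_indexes = [list() for i in range(len(pile))]
--     # Cycle by layers of pile
--     for l_index in range(len(pile)):
--
--         mx = None        # Max value in layer
--         maxes = []       # Indexes of max value (there may be several)
--
--         # Cycle by items in layer
--         for i_index in range(len(pile[l_index])):
--
--             num = pile[l_index][i_index] # Value of item
--
--             # If value of item not None, and max value is None or less than Item
--             if num is not None:
--                 if mx is None or mx < num:
--                     mx = num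
--                     maxes = [i_index]
--                 elif mx == num:
--                     maxes.append(i_index)
--
--         for i in maxes:
--             pile[l_index][i] = None
--         new_indexes[l_index] += maxes
--
--
--     return new_indexes
-- ===== SOURCE B (Python) =====
-- def get_new_indexes(pile):
--     new_indexes = []
--     for layer in pile:
--         vals = [v for v in layer if v is not None]
--         if vals:
--             m = max(vals)
--             idxs = [i for i, v in enumerate(layer) if v == m]
--             for i in idxs:
--                 layer[i] = None
--         else:
--             idxs = []
--         new_indexes.append(idxs)
--     return new_indexes
-- ===== Notes on version B (the rewrite author's own statement) =====
-- stated objective: simpler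
-- what changed: Replaces A's single-pass running-max state machine (Option max, three-way compare, reset-or-append index list) by a plain two-pass per layer: compute the layer maximum of non-None values with max(), then collect all indices equal to it with enumerate; the index-addressed outer loop with a preallocated result list becomes a direct append per layer.
import Mathlib
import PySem

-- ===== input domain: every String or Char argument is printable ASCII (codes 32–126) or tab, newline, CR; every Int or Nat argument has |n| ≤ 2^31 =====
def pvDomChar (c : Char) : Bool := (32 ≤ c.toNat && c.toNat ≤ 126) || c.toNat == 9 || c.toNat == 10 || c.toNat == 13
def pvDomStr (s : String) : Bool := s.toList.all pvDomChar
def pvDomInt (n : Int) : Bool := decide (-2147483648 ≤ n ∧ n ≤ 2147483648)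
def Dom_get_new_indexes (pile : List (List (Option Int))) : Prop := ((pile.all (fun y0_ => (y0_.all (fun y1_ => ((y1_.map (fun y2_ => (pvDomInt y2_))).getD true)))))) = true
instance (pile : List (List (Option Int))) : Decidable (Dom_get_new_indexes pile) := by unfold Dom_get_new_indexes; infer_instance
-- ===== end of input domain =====

-- B replaces A's single-pass running-max state machine by a two-pass per layer (max of the
-- non-None values, then collect the indices equal to it) — objective: simpler.
-- Both Pythons mutate `pile` identically (nulling the max positions); the equivalence proved
-- here is about the RETURN value.

-- ===== PORT A =====
-- literal transliteration of A: preallocated result list, index loop over layers, inner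
-- index loop carrying the running max `mx` and its index list `maxes`, then the in-place
-- nulling (carried as the pile component of the fold state) and new_indexes[l] += maxes.
def get_new_indexes (pile : List (List (Option Int))) : List (List Int) :=
  let new_indexes : List (List Int) := (List.range pile.length).map (fun _ => ([] : List Int))
  let st := (PySem.List.pyRange 0 (pile.length : Int) 1).foldl
    (fun (st : List (List (Option Int)) × List (List Int)) l_index =>
      let pile := st.1
      let new_indexes := st.2
      let layer := PySem.List.pyGetD pile l_index []
      let inner := (PySem.List.pyRange 0 (layer.length : Int) 1).foldl
        (fun (acc : Option Int × List Int) i_index =>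
          let mx := acc.1
          let maxes := acc.2
          let num := PySem.List.pyGetD layer i_index none
          match num with
          | none => (mx, maxes)
          | some v =>
            match mx with
            | none => (some v, [i_index])
            | some m =>
              if m < v then (some v, [i_index])
              else if m = v then (some m, maxes ++ [i_index])
              else (some m, maxes))
        ((none : Option Int), ([] : List Int))
      let maxes := inner.2
      -- for i in maxes: pile[l_index][i] = None   (mutating the aliased layer list)
      let layer' := maxes.foldl (fun ly i => PySem.List.pySetD ly i none) layer
      (PySem.List.pySetD pile l_index layer',
       PySem.List.pySetD new_indexes l_index (PySem.List.pyGetD new_indexes l_index [] ++ maxes)))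
    (pile, new_indexes)
  st.2

-- ===== PORT B =====
-- literal transliteration of B (Source B): for each layer, vals = non-None values, m = max(vals)
-- (when vals is nonempty), idxs = indices whose value equals m, appended layer by layer.
-- (Source B's nulling of the idxs positions mutates the layer and is not part of the return value.)
def get_new_indexes_alt (pile : List (List (Option Int))) : List (List Int) :=
  pile.foldl
    (fun (new_indexes : List (List Int)) layer =>
      let vals := layer.filterMap id
      let idxs : List Int :=
        match PySem.List.max? vals (fun y => y) with
        | none => []
        | some m => (PySem.List.enumerate layer 0).filterMap
            (fun p => if p.2 = some m then some p.1 else none)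
      new_indexes ++ [idxs])
    []

-- ===== PRECONDITION & SPEC =====
def Spec_get_new_indexes (pile : List (List (Option Int))) (out : List (List Int)) : Prop := out = get_new_indexes_alt pile
instance (pile : List (List (Option Int))) (out : List (List Int)) : Decidable (Spec_get_new_indexes pile out) := by unfold Spec_get_new_indexes; infer_instance

-- ===== CLAIM (what is proved, stated in full; the proofs are below) =====
def Claim_equal_get_new_indexes : Prop := ∀ (pile : List (List (Option Int))), Dom_get_new_indexes pile → Spec_get_new_indexes pile (get_new_indexes pile)

-- ===== LEMMAS AND PROOFS =====

-- A's inner-loop step, on an (index, value) pair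
def pvStepA (acc : Option Int × List Int) (p : Int × Option Int) : Option Int × List Int :=
  match p.2 with
  | none => (acc.1, acc.2)
  | some v =>
    match acc.1 with
    | none => (some v, [p.1])
    | some m =>
      if m < v then (some v, [p.1])
      else if m = v then (some m, acc.2 ++ [p.1])
      else (some m, acc.2)

-- running max of the non-None values of an enumerated list, seeded with m
def pvMaxFrom (m : Int) (l : List (Int × Option Int)) : Int :=
  l.foldl (fun acc p => match p.2 with | none => acc | some v => max acc v) m

-- indices of the enumerated list whose value is some M
def pvIdxs (M : Int) (l : List (Int × Option Int)) : List Int :=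
  l.filterMap (fun p => if p.2 = some M then some p.1 else none)

-- A's per-layer result / B's per-layer result
def pvLayerA (layer : List (Option Int)) : List Int :=
  ((PySem.List.pyRange 0 (layer.length : Int) 1).foldl
    (fun (acc : Option Int × List Int) i_index =>
      pvStepA acc (i_index, PySem.List.pyGetD layer i_index none))
    ((none : Option Int), ([] : List Int))).2

def pvLayerB (layer : List (Option Int)) : List Int :=
  match PySem.List.max? (layer.filterMap id) (fun y => y) with
  | none => []
  | some m => pvIdxs m (PySem.List.enumerate layer 0)

lemma pvLe_maxFrom (l : List (Int × Option Int)) (m : Int) : m ≤ pvMaxFrom m l := by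
  induction l generalizing m with
  | nil => simp [pvMaxFrom]
  | cons p t ih =>
    simp only [pvMaxFrom, List.foldl_cons]
    cases p.2 with
    | none => exact ih m
    | some v => exact le_trans (le_max_left m v) (ih (max m v))

lemma pvRunA_some (l : List (Int × Option Int)) (m : Int) (ms : List Int) :
    l.foldl pvStepA (some m, ms) =
      (some (pvMaxFrom m l),
       (if pvMaxFrom m l = m then ms else []) ++ pvIdxs (pvMaxFrom m l) l) := by
  induction l generalizing m ms with
  | nil => simp [pvMaxFrom, pvIdxs]
  | cons p t ih =>
    obtain ⟨i, o⟩ := p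
    cases o with
    | none =>
      simp only [List.foldl_cons, pvStepA, pvMaxFrom, pvIdxs, List.filterMap_cons]
      simpa [pvMaxFrom, pvIdxs] using ih m ms
    | some v =>
      have hM : pvMaxFrom m ((i, some v) :: t) = pvMaxFrom (max m v) t := by
        simp [pvMaxFrom]
      rw [List.foldl_cons]
      rcases lt_trichotomy m v with hlt | heq | hgt
      · have hstep : pvStepA (some m, ms) (i, some v) = (some v, [i]) := by
          simp [pvStepA, hlt]
        have hmax : max m v = v := max_eq_right hlt.le
        have hVle : v ≤ pvMaxFrom v t := pvLe_maxFrom t v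
        have hne : pvMaxFrom v t ≠ m := by omega
        rw [hstep, ih v [i]]
        rw [hM, hmax]
        simp only [pvIdxs, List.filterMap_cons, if_neg hne]
        by_cases h : pvMaxFrom v t = v
        · simp [h]
        · have h2 : ¬ ((some v : Option Int) = some (pvMaxFrom v t)) := by
            simp; exact fun hh => h hh.symm
          simp [h, h2]
      · subst heq
        have hstep : pvStepA (some m, ms) (i, some m) = (some m, ms ++ [i]) := by
          simp [pvStepA]
        have hmax : max m m = m := max_self m
        rw [hstep, ih m (ms ++ [i]), hM, hmax]
        simp only [pvIdxs, List.filterMap_cons]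
        by_cases h : pvMaxFrom m t = m
        · simp [h, List.append_assoc]
        · have hmle : m ≤ pvMaxFrom m t := pvLe_maxFrom t m
          have h2 : ¬ ((some m : Option Int) = some (pvMaxFrom m t)) := by
            simp; omega
          simp [h, h2]
      · have hstep : pvStepA (some m, ms) (i, some v) = (some m, ms) := by
          have h1 : ¬ m < v := by omega
          have h2 : ¬ m = v := by omega
          simp [pvStepA, h1, h2]
        have hmax : max m v = m := max_eq_left hgt.le
        have hmle : m ≤ pvMaxFrom m t := pvLe_maxFrom t m
        have hne : ¬ ((some v : Option Int) = some (pvMaxFrom m t)) := by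
          simp; omega
        rw [hstep, ih m ms, hM, hmax]
        simp [pvIdxs, hne]

lemma pvMaxFrom_enum (t : List (Option Int)) : ∀ (v : Int) (s : Int),
    pvMaxFrom v (PySem.List.enumerate t s) = (t.filterMap id).foldl max v := by
  induction t with
  | nil => intro v s; simp [pvMaxFrom, PySem.List.enumerate_nil]
  | cons o t ih =>
    intro v s
    rw [PySem.List.enumerate_cons]
    cases o with
    | none => simpa [pvMaxFrom] using ih v (s + 1)
    | some w => simpa [pvMaxFrom] using ih (max v w) (s + 1)

lemma pvLayer_enum (layer : List (Option Int)) : ∀ (k : Int),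
    ((PySem.List.enumerate layer k).foldl pvStepA ((none : Option Int), ([] : List Int))).2 =
      match PySem.List.max? (layer.filterMap id) (fun y => y) with
      | none => []
      | some m => pvIdxs m (PySem.List.enumerate layer k) := by
  induction layer with
  | nil => intro k; simp [PySem.List.enumerate_nil, PySem.List.max?]
  | cons o t ih =>
    intro k
    rw [PySem.List.enumerate_cons]
    cases o with
    | none =>
      have hmax : ((none : Option Int) :: t).filterMap id = t.filterMap id := by simp
      simp only [List.foldl_cons, pvStepA, hmax]
      rw [ih (k + 1)]
      cases h : PySem.List.max? (t.filterMap id) (fun y => y) with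
      | none => simp
      | some m => simp [pvIdxs]
    | some v =>
      simp only [List.foldl_cons]
      have hstep : pvStepA ((none : Option Int), ([] : List Int)) (k, some v) = (some v, [k]) := by
        simp [pvStepA]
      rw [hstep, pvRunA_some]
      have hmax : ((some v : Option Int) :: t).filterMap id = v :: t.filterMap id := by simp
      rw [hmax, PySem.List.max?_id_cons]
      rw [← pvMaxFrom_enum t v (k + 1)]
      simp only [pvIdxs, List.filterMap_cons]
      by_cases h : pvMaxFrom v (PySem.List.enumerate t (k + 1)) = v
      · simp [h]
      · simp [h, show ¬ ((some v : Option Int) = some (pvMaxFrom v (PySem.List.enumerate t (k + 1)))) from by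
          simp; exact fun hh => h hh.symm]

lemma pvLayerA_eq_B (layer : List (Option Int)) : pvLayerA layer = pvLayerB layer := by
  unfold pvLayerA pvLayerB
  have h1 : (PySem.List.pyRange 0 (layer.length : Int) 1).foldl
      (fun (acc : Option Int × List Int) i_index =>
        pvStepA acc (i_index, PySem.List.pyGetD layer i_index none))
      ((none : Option Int), ([] : List Int))
      = ((PySem.List.pyRange 0 (layer.length : Int) 1).map
          (fun j => (j, PySem.List.pyGetD layer j none))).foldl pvStepA
          ((none : Option Int), ([] : List Int)) := by
    rw [List.foldl_map]
  rw [h1]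
  rw [show ((PySem.List.pyRange 0 (layer.length : Int) 1).map
      (fun j => (j, PySem.List.pyGetD layer j none))) = PySem.List.enumerate layer 0 from by
    rw [PySem.List.enumerate_eq_map_pyRange (d := none)]; simp [pysem]]
  exact pvLayer_enum layer 0

-- A's outer-loop step
def pvGA (st : List (List (Option Int)) × List (List Int)) (l_index : Int) :
    List (List (Option Int)) × List (List Int) :=
  let pile := st.1
  let new_indexes := st.2
  let layer := PySem.List.pyGetD pile l_index []
  let maxes := pvLayerA layer
  let layer' := maxes.foldl (fun ly i => PySem.List.pySetD ly i none) layer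
  (PySem.List.pySetD pile l_index layer',
   PySem.List.pySetD new_indexes l_index (PySem.List.pyGetD new_indexes l_index [] ++ maxes))

lemma pvOuter_inv (rest : List (List (Option Int))) : ∀ (j : Nat)
    (P : List (List (Option Int))) (N : List (List Int)),
    P.drop j = rest → N.drop j = List.replicate rest.length ([] : List Int) →
    ((PySem.List.pyRange (j : Int) ((j : Int) + rest.length) 1).foldl pvGA (P, N)).2 =
      N.take j ++ rest.map pvLayerA := by
  induction rest with
  | nil =>
    intro j P N hP hN
    rw [PySem.List.pyRange_one_eq_nil (by simp)]
    simp only [List.foldl_nil, List.length_nil, List.replicate_zero] at *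
    rw [List.take_of_length_le (List.drop_eq_nil_iff.mp hN)]
    simp
  | cons hd tl ih =>
    intro j P N hP hN
    have hjP : j < P.length := by
      by_contra h
      rw [List.drop_eq_nil_of_le (by omega)] at hP; simp at hP
    have hjN : j < N.length := by
      by_contra h
      rw [List.drop_eq_nil_of_le (by omega)] at hN; simp at hN
    have hPj : P[j] = hd := by
      have h2 : (P.drop j)[0]? = P[j + 0]? := List.getElem?_drop ..
      rw [hP] at h2; simp at h2
      simp [List.getElem_eq_iff, h2]
    have hNj : N[j] = [] := by
      have h2 : (N.drop j)[0]? = N[j + 0]? := List.getElem?_drop ..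
      rw [hN] at h2; simp at h2
      simp [List.getElem_eq_iff, h2]
    rw [PySem.List.pyRange_one_cons (by push_cast [List.length_cons]; omega)]
    rw [List.foldl_cons]
    have hstep : pvGA (P, N) (j : Int) =
        (P.set j ((pvLayerA hd).foldl (fun ly i => PySem.List.pySetD ly i none) hd),
         N.set j (pvLayerA hd)) := by
      simp only [pvGA]
      rw [show PySem.List.pyGetD P (j : Int) [] = hd from by
        simp [PySem.List.pyGetD_natCast, List.getD_eq_getElem?_getD, hPj,
          List.getElem?_eq_getElem hjP]]
      rw [show PySem.List.pyGetD N (j : Int) [] = [] from by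
        simp [PySem.List.pyGetD_natCast, List.getD_eq_getElem?_getD, hNj,
          List.getElem?_eq_getElem hjN]]
      simp [PySem.List.pySetD_natCast]
    rw [hstep]
    have hrange : PySem.List.pyRange ((j : Int) + 1) ((j : Int) + (hd :: tl).length) 1
        = PySem.List.pyRange ((j + 1 : Nat) : Int) (((j + 1 : Nat) : Int) + tl.length) 1 := by
      push_cast [List.length_cons]; ring_nf
    rw [hrange]
    rw [ih (j + 1) _ _
      (by rw [List.drop_set, if_pos (by omega), ← List.tail_drop, hP]; rfl)
      (by rw [List.drop_set, if_pos (by omega), ← List.tail_drop, hN]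
          simp [List.length_cons, List.replicate_succ])]
    have htake : (N.set j (pvLayerA hd)).take (j + 1) = N.take j ++ [pvLayerA hd] := by
      rw [List.take_set]
      rw [List.take_add_one, List.getElem?_eq_getElem hjN]
      rw [List.set_append_right _ _ (by simp [List.length_take, Nat.min_eq_left hjN.le])]
      simp [List.length_take, Nat.min_eq_left hjN.le]
    rw [htake]
    simp

theorem pv_main (pile : List (List (Option Int))) :
    get_new_indexes pile = get_new_indexes_alt pile := by
  have hA : get_new_indexes pile =
      ((PySem.List.pyRange 0 (pile.length : Int) 1).foldl pvGA
        (pile, List.replicate pile.length ([] : List Int))).2 := by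
    unfold get_new_indexes pvGA pvLayerA pvStepA
    rw [show (List.range pile.length).map (fun _ => ([] : List Int))
        = List.replicate pile.length ([] : List Int) from by
      simp [List.map_const']]
  have hB : get_new_indexes_alt pile = pile.map pvLayerB := by
    unfold get_new_indexes_alt pvLayerB pvIdxs
    exact PySem.List.foldl_append_singleton_eq_map ..
  rw [hA, hB]
  have := pvOuter_inv pile 0 pile (List.replicate pile.length ([] : List Int))
    (by simp) (by simp)
  rw [show List.map pvLayerB pile = List.map pvLayerA pile from
    List.map_congr_left (fun x _ => (pvLayerA_eq_B x).symm)]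
  simpa using this

-- ===== VERDICT (by name: the statement is the Claim_ definition above) =====
theorem get_new_indexes_spec : Claim_equal_get_new_indexes := by
  intro pile _
  unfold Spec_get_new_indexes
  exact pv_main pile
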